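-- pv_equiv track=rewrite | github.com/marbl/verkko | src/scripts/add_hom_node_scaffold_edges.py | reduce_to_leaves
-- ===== SOURCE A (Python) =====
-- def revnode(n):
-- 	assert len(n) >= 2
-- 	assert n[0] == ">" or n[0] == "<"
-- 	return (">" if n[0] == "<" else "<") + n[1:]
--
-- def reduce_to_leaves(path, nodemap):
-- 	result = list(path)
-- 	while True:
-- 		changed = False
-- 		new_result = []
-- 		for node in result:
-- 			if node[1:] not in nodemap:
-- 				new_result.append(node)
-- 			else:
-- 				add = nodemap[node[1:]]
-- 				if node[0] == "<":
-- 					add = [revnode(n) for n in add[::-1]]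
-- 				new_result += add
-- 				changed = True
-- 		if not changed: break
-- 		result = new_result
-- 	return result
-- ===== SOURCE B (Python) =====
-- def reduce_to_leaves(path, nodemap):
-- 	out = []
-- 	stack = list(path)
-- 	stack.reverse()
-- 	while stack:
-- 		node = stack.pop()
-- 		children = nodemap.get(node[1:])
-- 		if children is None:
-- 			out.append(node)
-- 		elif node[0] == "<":
-- 			stack.extend((">" if c[0] == "<" else "<") + c[1:] for c in children)
-- 		else:
-- 			stack.extend(reversed(children))
-- 	return out
-- ===== Notes on version B (the rewrite author's own statement) =====
-- stated objective: alternative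
-- what changed: A re-scans and copies the whole node list once per expansion level until a pass changes nothing; B does a single stack/worklist traversal that pushes each expansion (reversed and sign-flipped for '<') back onto the stack and emits every leaf exactly once.
import Mathlib
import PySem

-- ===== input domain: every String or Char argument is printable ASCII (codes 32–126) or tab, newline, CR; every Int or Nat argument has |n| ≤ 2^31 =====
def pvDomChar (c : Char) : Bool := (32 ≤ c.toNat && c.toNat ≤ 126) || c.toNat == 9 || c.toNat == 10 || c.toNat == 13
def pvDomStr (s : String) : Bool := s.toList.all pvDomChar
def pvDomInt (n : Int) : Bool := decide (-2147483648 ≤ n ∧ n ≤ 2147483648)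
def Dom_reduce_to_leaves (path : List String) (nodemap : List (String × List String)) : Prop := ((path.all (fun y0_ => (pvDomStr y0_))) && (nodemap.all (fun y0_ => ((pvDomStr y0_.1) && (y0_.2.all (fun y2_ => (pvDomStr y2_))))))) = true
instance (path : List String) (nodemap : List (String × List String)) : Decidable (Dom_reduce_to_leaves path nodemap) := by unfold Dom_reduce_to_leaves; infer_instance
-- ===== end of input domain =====

-- B replaces A's repeated global rewriting passes (one pass per expansion level, each copying the
-- whole list) by a single worklist traversal that pushes expansions back on a stack and emits each
-- leaf exactly once.

-- shared primitive helpers (dict lookup, node[1:], node[0] == "<", revnode)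
def pvLookup (nodemap : List (String × List String)) (q : String) : Option (List String) :=
  (PySem.Dict.ofList nodemap).get? q

def pvKey (n : String) : String := String.ofList n.toList.tail        -- n[1:]

def pvIsLt (n : String) : Bool := n.toList.head? == some '<'          -- n[0] == "<" (n nonempty when A reads it inside Pre_)

-- revnode(n) = (">" if n[0] == "<" else "<") + n[1:]   (the asserts cannot fire inside Pre_)
def pvRevnode (n : String) : String :=
  String.ofList ((if pvIsLt n then '>' else '<') :: n.toList.tail)

-- ===== PORT A =====
-- one 'for node in result' pass: builds (new_result, changed)
def pvPassA (nodemap : List (String × List String)) (res : List String) : List String × Bool :=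
  res.foldl (fun acc node =>
    match pvLookup nodemap (pvKey node) with
    | none => (acc.1 ++ [node], acc.2)
    | some add =>
        (acc.1 ++ (if pvIsLt node then add.reverse.map pvRevnode else add), true))
    ([], false)

-- the 'while True' loop; the fuel only makes it total (inside Pre_ it stabilises in ≤ |nodemap|+1 passes)
def pvLoopA (nodemap : List (String × List String)) : Nat → List String → List String
  | 0, res => res
  | fuel + 1, res =>
      let p := pvPassA nodemap res
      if p.2 then pvLoopA nodemap fuel p.1 else res

def reduce_to_leaves (path : List String) (nodemap : List (String × List String)) : List String :=
  pvLoopA nodemap (nodemap.length + 1) path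

-- ===== PORT B =====
-- the expansion pushed in front of the stack when 'node' is popped (stack is popped at the head)
def pvPushB (node : String) (cs : List String) : List String :=
  if pvIsLt node then (cs.map pvRevnode).reverse else cs

-- fuel for the worklist loop: exact number of pops = total size of the expansion forest
def pvSizeB (nodemap : List (String × List String)) : Nat → String → Nat
  | 0, _ => 1
  | fuel + 1, node =>
      match pvLookup nodemap (pvKey node) with
      | none => 1
      | some cs => 1 + ((pvPushB node cs).map (pvSizeB nodemap fuel)).sum

def pvLoopB (nodemap : List (String × List String)) : Nat → List String → List String → List String
  | _, [], out => out
  | 0, _ :: _, out => out          -- fuel exhausted: unreachable inside Pre_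
  | fuel + 1, node :: stack, out =>
      match pvLookup nodemap (pvKey node) with
      | none => pvLoopB nodemap fuel stack (out ++ [node])
      | some cs => pvLoopB nodemap fuel (pvPushB node cs ++ stack) out

def reduce_to_leaves_alt (path : List String) (nodemap : List (String × List String)) : List String :=
  pvLoopB nodemap ((path.map (pvSizeB nodemap nodemap.length)).sum) path []

-- ===== PRECONDITION & SPEC =====
def pvWfChild (c : String) : Bool :=
  decide (2 ≤ c.toList.length) && (c.toList.head? == some '<' || c.toList.head? == some '>')

-- pvSafe nodemap fuel node: the expansion relation below 'node' is well-founded (it bottoms out in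
-- leaves within 'fuel' levels), never expands the empty string (A's IndexError) and every
-- '<'-expansion has well-formed children (A's asserts). This bounded recursion over the nodemap's
-- child graph is the decidable form of that well-foundedness; it checks a shape of the input, it
-- does not compute either program's result.
def pvSafe (nodemap : List (String × List String)) : Nat → String → Bool
  | 0, node => !(pvLookup nodemap (pvKey node)).isSome
  | fuel + 1, node =>
      match pvLookup nodemap (pvKey node) with
      | none => true
      | some cs =>
          !(node == "") && (!pvIsLt node || cs.all pvWfChild)
            && (if pvIsLt node then cs.reverse.map pvRevnode else cs).all (pvSafe nodemap fuel)

-- Pre_ holds exactly when A terminates without an exception: every path node expands to leaves in at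
-- most |nodemap| levels (an expansion depth is bounded by the number of distinct keys whenever it is
-- finite), no empty node is expanded, and '<'-expanded children satisfy revnode's asserts.
def Pre_reduce_to_leaves (path : List String) (nodemap : List (String × List String)) : Prop :=
  path.all (pvSafe nodemap nodemap.length) = true

instance (path : List String) (nodemap : List (String × List String)) : Decidable (Pre_reduce_to_leaves path nodemap) := by unfold Pre_reduce_to_leaves; infer_instance

def pvWitness_reduce_to_leaves : List String × (List (String × List String)) :=
  (["<a", ">b"], [("a", [">x", "<y"])])

def Spec_reduce_to_leaves (path : List String) (nodemap : List (String × List String)) (out : List String) : Prop := out = reduce_to_leaves_alt path nodemap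
instance (path : List String) (nodemap : List (String × List String)) (out : List String) : Decidable (Spec_reduce_to_leaves path nodemap out) := by unfold Spec_reduce_to_leaves; infer_instance

-- ===== CLAIM (what is proved, stated in full; the proofs are below) =====
def Claim_equal_reduce_to_leaves : Prop := ∀ (path : List String) (nodemap : List (String × List String)), Dom_reduce_to_leaves path nodemap → Pre_reduce_to_leaves path nodemap → Spec_reduce_to_leaves path nodemap (reduce_to_leaves path nodemap)

-- ===== LEMMAS AND PROOFS =====

-- the canonical expansion of one node to leaves, with fuel (A-orientation of the '<' children)
def pvExp (nodemap : List (String × List String)) : Nat → String → List String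
  | 0, n => [n]
  | fuel + 1, n =>
      match pvLookup nodemap (pvKey n) with
      | none => [n]
      | some cs => (if pvIsLt n then cs.reverse.map pvRevnode else cs).flatMap (pvExp nodemap fuel)

-- one-level expansion of a node, and "node is expandable"
def pvStep1 (nodemap : List (String × List String)) (n : String) : List String :=
  match pvLookup nodemap (pvKey n) with
  | none => [n]
  | some cs => if pvIsLt n then cs.reverse.map pvRevnode else cs

def pvIsExp (nodemap : List (String × List String)) (n : String) : Bool :=
  (pvLookup nodemap (pvKey n)).isSome

theorem pvSafe_leaf (nodemap : List (String × List String)) (f : Nat) (n : String)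
    (h : pvLookup nodemap (pvKey n) = none) : pvSafe nodemap f n = true := by
  cases f <;> simp [pvSafe, h]

theorem pvSafe_succ (nodemap : List (String × List String)) (f : Nat) (n : String)
    (h : pvSafe nodemap f n = true) : pvSafe nodemap (f + 1) n = true := by
  induction f generalizing n with
  | zero =>
      have hl : pvLookup nodemap (pvKey n) = none := by
        simpa [pvSafe, Option.isSome_eq_false_iff, Option.isNone_iff_eq_none] using h
      simp [pvSafe, hl]
  | succ f ih =>
      cases hl : pvLookup nodemap (pvKey n) with
      | none => simp [pvSafe, hl]
      | some cs =>
          simp only [pvSafe, hl, Bool.and_eq_true, List.all_eq_true] at h ⊢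
          exact ⟨h.1, fun m hm => ih m (h.2 m hm)⟩

theorem pvSafe_children (nodemap : List (String × List String)) (f : Nat) (n : String) (cs : List String)
    (hl : pvLookup nodemap (pvKey n) = some cs) (h : pvSafe nodemap (f + 1) n = true) :
    ∀ m ∈ (if pvIsLt n then cs.reverse.map pvRevnode else cs), pvSafe nodemap f m = true := by
  simp only [pvSafe, hl, Bool.and_eq_true, List.all_eq_true] at h
  exact h.2

theorem pvExp_leaf (nodemap : List (String × List String)) (f : Nat) (n : String)
    (h : pvLookup nodemap (pvKey n) = none) : pvExp nodemap f n = [n] := by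
  cases f <;> simp [pvExp, h]

theorem pvExp_stable (nodemap : List (String × List String)) (f e : Nat) (n : String)
    (h : pvSafe nodemap f n = true) : pvExp nodemap (f + e) n = pvExp nodemap f n := by
  induction f generalizing n e with
  | zero =>
      have hl : pvLookup nodemap (pvKey n) = none := by
        simpa [pvSafe, Option.isSome_eq_false_iff, Option.isNone_iff_eq_none] using h
      rw [pvExp_leaf nodemap _ n hl, pvExp_leaf nodemap _ n hl]
  | succ f ih =>
      cases hl : pvLookup nodemap (pvKey n) with
      | none => rw [pvExp_leaf nodemap _ n hl, pvExp_leaf nodemap _ n hl]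
      | some cs =>
          have harr : f + 1 + e = (f + e) + 1 := by omega
          rw [harr]
          simp only [pvExp, hl]
          refine List.flatMap_congr ?_
          intro m hm
          exact ih e m (pvSafe_children nodemap f n cs hl h m hm)

theorem pvSizeB_leaf (nodemap : List (String × List String)) (f : Nat) (n : String)
    (h : pvLookup nodemap (pvKey n) = none) : pvSizeB nodemap f n = 1 := by
  cases f <;> simp [pvSizeB, h]

theorem pvSizeB_pos (nodemap : List (String × List String)) (f : Nat) (n : String) :
    1 ≤ pvSizeB nodemap f n := by
  cases f with
  | zero => simp [pvSizeB]
  | succ f => cases h : pvLookup nodemap (pvKey n) <;> simp [pvSizeB, h]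

theorem pvSizeB_stable (nodemap : List (String × List String)) (f e : Nat) (n : String)
    (h : pvSafe nodemap f n = true) : pvSizeB nodemap (f + e) n = pvSizeB nodemap f n := by
  induction f generalizing n e with
  | zero =>
      have hl : pvLookup nodemap (pvKey n) = none := by
        simpa [pvSafe, Option.isSome_eq_false_iff, Option.isNone_iff_eq_none] using h
      rw [pvSizeB_leaf nodemap _ n hl, pvSizeB_leaf nodemap _ n hl]
  | succ f ih =>
      cases hl : pvLookup nodemap (pvKey n) with
      | none => rw [pvSizeB_leaf nodemap _ n hl, pvSizeB_leaf nodemap _ n hl]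
      | some cs =>
          have harr : f + 1 + e = (f + e) + 1 := by omega
          rw [harr]
          simp only [pvSizeB, hl]
          congr 1
          refine congrArg List.sum (List.map_congr_left ?_)
          intro m hm
          refine ih e m (pvSafe_children nodemap f n cs hl h m ?_)
          simpa [pvPushB, List.map_reverse] using hm

-- A's pass, spread out: new_result = result.flatMap step1, changed = any expandable
theorem pvPassA_fold (nodemap : List (String × List String)) (l : List String) :
    ∀ acc : List String × Bool,
      l.foldl (fun acc node =>
          match pvLookup nodemap (pvKey node) with
          | none => (acc.1 ++ [node], acc.2)
          | some add =>
              (acc.1 ++ (if pvIsLt node then add.reverse.map pvRevnode else add), true)) acc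
        = (acc.1 ++ l.flatMap (pvStep1 nodemap), acc.2 || l.any (pvIsExp nodemap)) := by
  induction l with
  | nil => intro acc; simp
  | cons n l ih =>
      intro acc
      cases hl : pvLookup nodemap (pvKey n) with
      | none =>
          simp only [List.foldl_cons, ih, List.flatMap_cons, List.any_cons,
            pvStep1, pvIsExp, hl]
          simp [List.append_assoc]
      | some cs =>
          simp only [List.foldl_cons, ih, List.flatMap_cons, List.any_cons,
            pvStep1, pvIsExp, hl]
          simp [List.append_assoc]

theorem pvPassA_eq (nodemap : List (String × List String)) (l : List String) :
    pvPassA nodemap l = (l.flatMap (pvStep1 nodemap), l.any (pvIsExp nodemap)) := by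
  simpa [pvPassA] using pvPassA_fold nodemap l ([], false)

theorem pvSafe_step1 (nodemap : List (String × List String)) (d : Nat) (n : String)
    (h : pvSafe nodemap (d + 1) n = true) :
    ∀ m ∈ pvStep1 nodemap n, pvSafe nodemap d m = true := by
  cases hl : pvLookup nodemap (pvKey n) with
  | none =>
      intro m hm
      simp only [pvStep1, hl, List.mem_singleton] at hm
      exact hm ▸ pvSafe_leaf nodemap d n hl
  | some cs =>
      intro m hm
      simp only [pvStep1, hl] at hm
      exact pvSafe_children nodemap d n cs hl h m hm

theorem pvStep1_exp (nodemap : List (String × List String)) (d : Nat) (n : String) :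
    (pvStep1 nodemap n).flatMap (pvExp nodemap d) = pvExp nodemap (d + 1) n := by
  cases hl : pvLookup nodemap (pvKey n) with
  | none => simp [pvStep1, hl, pvExp_leaf nodemap d n hl, pvExp]
  | some cs => simp [pvStep1, hl, pvExp]

theorem pvLeaves_flatMap (nodemap : List (String × List String)) (d : Nat) (l : List String)
    (h : ∀ n ∈ l, pvLookup nodemap (pvKey n) = none) :
    l.flatMap (pvExp nodemap d) = l := by
  induction l with
  | nil => simp
  | cons n l ih =>
      rw [List.flatMap_cons, pvExp_leaf nodemap d n (h n (List.mem_cons_self ..)),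
        ih (fun m hm => h m (List.mem_cons_of_mem _ hm))]
      simp

theorem pvLoopA_eq (nodemap : List (String × List String)) :
    ∀ (d fuel : Nat) (l : List String), (∀ n ∈ l, pvSafe nodemap d n = true) → d < fuel →
      pvLoopA nodemap fuel l = l.flatMap (pvExp nodemap d) := by
  intro d
  induction d with
  | zero =>
      intro fuel l hs hf
      cases fuel with
      | zero => omega
      | succ f =>
          have hleaf : ∀ n ∈ l, pvLookup nodemap (pvKey n) = none := by
            intro n hn
            have := hs n hn
            simpa [pvSafe, Option.isSome_eq_false_iff, Option.isNone_iff_eq_none] using this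
          have hch : l.any (pvIsExp nodemap) = false := by
            simp only [List.any_eq_false, pvIsExp]
            intro n hn
            simp [hleaf n hn]
          simp only [pvLoopA, pvPassA_eq, hch]
          rw [if_neg (by simp), pvLeaves_flatMap nodemap 0 l hleaf]
  | succ d ih =>
      intro fuel l hs hf
      cases fuel with
      | zero => omega
      | succ f =>
          by_cases hch : l.any (pvIsExp nodemap) = true
          · have hstep : ∀ m ∈ l.flatMap (pvStep1 nodemap), pvSafe nodemap d m = true := by
              intro m hm
              obtain ⟨n, hn, hmn⟩ := List.mem_flatMap.mp hm
              exact pvSafe_step1 nodemap d n (hs n hn) m hmn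
            have := ih f (l.flatMap (pvStep1 nodemap)) hstep (by omega)
            simp only [pvLoopA, pvPassA_eq, hch, if_pos]
            rw [this, List.flatMap_assoc]
            exact List.flatMap_congr (fun n _ => pvStep1_exp nodemap d n)
          · have hleaf : ∀ n ∈ l, pvLookup nodemap (pvKey n) = none := by
              intro n hn
              have := List.any_eq_false.mp (Bool.eq_false_iff.mpr hch) n hn
              simpa [pvIsExp, Option.isSome_eq_false_iff, Option.isNone_iff_eq_none] using this
            simp only [pvLoopA, pvPassA_eq]
            rw [if_neg (by simpa using hch), pvLeaves_flatMap nodemap (d + 1) l hleaf]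

theorem pvPushB_eq (n : String) (cs : List String) :
    pvPushB n cs = if pvIsLt n then cs.reverse.map pvRevnode else cs := by
  simp [pvPushB, List.map_reverse]

theorem pvLoopB_eq (nodemap : List (String × List String)) (d : Nat) :
    ∀ (fuel : Nat) (stack out : List String), (∀ n ∈ stack, pvSafe nodemap d n = true) →
      (stack.map (pvSizeB nodemap d)).sum ≤ fuel →
      pvLoopB nodemap fuel stack out = out ++ stack.flatMap (pvExp nodemap d) := by
  intro fuel
  induction fuel with
  | zero =>
      intro stack out hs hsum
      cases stack with
      | nil => simp [pvLoopB]
      | cons n st =>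
          exfalso
          have h1 := pvSizeB_pos nodemap d n
          simp only [List.map_cons, List.sum_cons, Nat.le_zero] at hsum
          omega
  | succ f ih =>
      intro stack out hs hsum
      cases stack with
      | nil => simp [pvLoopB]
      | cons n st =>
          have hsn := hs n (List.mem_cons_self ..)
          have hst : ∀ m ∈ st, pvSafe nodemap d m = true :=
            fun m hm => hs m (List.mem_cons_of_mem _ hm)
          simp only [List.map_cons, List.sum_cons] at hsum
          cases hl : pvLookup nodemap (pvKey n) with
          | none =>
              simp only [pvLoopB, hl]
              rw [ih st (out ++ [n]) hst
                (by rw [pvSizeB_leaf nodemap d n hl] at hsum; omega)]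
              rw [List.flatMap_cons, pvExp_leaf nodemap d n hl]
              simp [List.append_assoc]
          | some cs =>
              cases d with
              | zero => simp [pvSafe, hl] at hsn
              | succ d' =>
                  have hch := pvSafe_children nodemap d' n cs hl hsn
                  rw [← pvPushB_eq] at hch
                  have hnew : ∀ m ∈ pvPushB n cs ++ st, pvSafe nodemap (d' + 1) m = true := by
                    intro m hm
                    rcases List.mem_append.mp hm with hm | hm
                    · exact pvSafe_succ nodemap d' m (hch m hm)
                    · exact hst m hm
                  have hsz : ∀ m ∈ pvPushB n cs,
                      pvSizeB nodemap (d' + 1) m = pvSizeB nodemap d' m :=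
                    fun m hm => pvSizeB_stable nodemap d' 1 m (hch m hm)
                  have hsum' : ((pvPushB n cs ++ st).map (pvSizeB nodemap (d' + 1))).sum ≤ f := by
                    rw [List.map_append, List.sum_append,
                      List.map_congr_left hsz]
                    rw [show pvSizeB nodemap (d' + 1) n
                        = 1 + ((pvPushB n cs).map (pvSizeB nodemap d')).sum by
                      simp [pvSizeB, hl]] at hsum
                    omega
                  simp only [pvLoopB, hl]
                  rw [ih (pvPushB n cs ++ st) out hnew hsum']
                  congr 1
                  rw [List.flatMap_append, List.flatMap_cons]
                  congr 1
                  rw [List.flatMap_congr (fun m hm => pvExp_stable nodemap d' 1 m (hch m hm))]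
                  simp [pvExp, hl, pvPushB_eq]

-- ===== VERDICT (by name: the statement is the Claim_ definition above) =====
theorem reduce_to_leaves_spec : Claim_equal_reduce_to_leaves := by
  intro path nodemap _ hpre
  unfold Spec_reduce_to_leaves reduce_to_leaves reduce_to_leaves_alt
  have hsafe : ∀ n ∈ path, pvSafe nodemap nodemap.length n = true := by
    simpa [Pre_reduce_to_leaves, List.all_eq_true] using hpre
  rw [pvLoopA_eq nodemap nodemap.length (nodemap.length + 1) path hsafe (Nat.lt_succ_self _),
      pvLoopB_eq nodemap nodemap.length _ path [] hsafe le_rfl]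
  simp
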